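-- pv_equiv track=rewrite | github.com/encryptogroup/LEAKER | leaker/attack/gjw.py | _extend_right
-- ===== SOURCE A (Python) =====
-- from typing import List, Iterable, Union, Any, Set, Tuple, FrozenSet
--
-- def _extend_right(big_si: Set[Tuple[int]], big_w: Set[int], b: int) -> Set:
--     big_s = set()
--     for s in big_si:
--         for w in big_w:
--             temp = {w + sum(list(reversed(s))[:x]) for x in range(1, b)}
--             if temp <= big_w:
--                 big_s.add(s + tuple([w]))
--     return big_s
-- ===== SOURCE B (Python) =====
-- def _extend_right(big_si, big_w, b):
--     big_s = set()
--     for s in big_si: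
--         n = len(s)
--         k = max(0, min(b - 1, n))
--         rev = s[::-1]
--         sums = []
--         acc = 0
--         for v in rev[:k]:
--             acc += v
--             sums.append(acc)
--         # sums now holds w-free partial sums for x = 1..min(b-1, n); for x > n the
--         # partial sum repeats the total, which is already sums[-1] unless s is empty:
--         if b - 1 > n and not sums:
--             sums = [0]
--         for w in big_w:
--             if all(w + p in big_w for p in sums):
--                 big_s.add(s + (w,))
--     return big_s
-- ===== Notes on version B (the rewrite author's own statement) =====
-- stated objective: faster
-- what changed: B computes the reversed prefix sums of each s once per s (capped at min(b-1, len(s)), since deeper slices repeat the total) and then checks membership of w+p with early exit, instead of rebuilding for every (s, w) pair a b-1 element set of sums, each recomputed by slicing and summing.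
import Mathlib
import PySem

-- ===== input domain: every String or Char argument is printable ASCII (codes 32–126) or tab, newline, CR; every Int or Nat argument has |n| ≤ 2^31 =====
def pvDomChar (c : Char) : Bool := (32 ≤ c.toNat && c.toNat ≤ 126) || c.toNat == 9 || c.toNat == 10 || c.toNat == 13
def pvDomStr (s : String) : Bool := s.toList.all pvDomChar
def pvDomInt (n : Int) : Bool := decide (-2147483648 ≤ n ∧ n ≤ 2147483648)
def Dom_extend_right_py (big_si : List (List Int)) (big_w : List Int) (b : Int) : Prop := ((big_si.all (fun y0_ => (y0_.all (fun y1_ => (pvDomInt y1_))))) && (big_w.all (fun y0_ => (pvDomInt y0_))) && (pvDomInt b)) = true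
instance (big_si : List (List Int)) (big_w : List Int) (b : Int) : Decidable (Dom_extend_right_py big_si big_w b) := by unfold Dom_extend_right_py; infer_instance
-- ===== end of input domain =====

-- B precomputes each s's reversed prefix sums once (capped at min(b-1, len s)) and checks
-- membership with early exit, instead of rebuilding a b-1 element sum set per (s, w) pair; faster.


-- ===== PORT A =====
-- for s in big_si: for w in big_w:
--   temp = {w + sum(list(reversed(s))[:x]) for x in range(1, b)}
--   if temp <= big_w: big_s.add(s + (w,))
def extend_right_py (big_si : List (List Int)) (big_w : List Int) (b : Int) : List (List Int) :=
  big_si.foldl (fun big_s s =>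
    big_w.foldl (fun big_s w =>
      let temp : PySem.Set Int := PySem.Set.ofList
        ((PySem.List.pyRange 1 b 1).map (fun x =>
          w + (PySem.List.slice s.reverse none (some x)).sum))
      if PySem.Set.issubset temp big_w then PySem.Set.add big_s (s ++ [w]) else big_s)
      big_s)
    PySem.Set.empty

-- ===== PORT B =====
def extend_right_py_alt (big_si : List (List Int)) (big_w : List Int) (b : Int) : List (List Int) :=
  big_si.foldl (fun big_s s =>
    let n : Int := s.length
    let k : Int := max 0 (min (b - 1) n)
    let rev := s.reverse
    -- for v in rev[:k]: acc += v; sums.append(acc)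
    let st := (PySem.List.slice rev none (some k)).foldl
      (fun (st : List Int × Int) v => (st.1 ++ [st.2 + v], st.2 + v)) ([], 0)
    let sums := if b - 1 > n ∧ st.1 = [] then [0] else st.1
    big_w.foldl (fun big_s w =>
      if sums.all (fun p => PySem.Set.contains big_w (w + p))
      then PySem.Set.add big_s (s ++ [w]) else big_s)
      big_s)
    PySem.Set.empty

-- ===== PRECONDITION & SPEC =====
def Spec_extend_right_py (big_si : List (List Int)) (big_w : List Int) (b : Int) (out : List (List Int)) : Prop := out = extend_right_py_alt big_si big_w b
instance (big_si : List (List Int)) (big_w : List Int) (b : Int) (out : List (List Int)) : Decidable (Spec_extend_right_py big_si big_w b out) := by unfold Spec_extend_right_py; infer_instance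

-- ===== CLAIM (what is proved, stated in full; the proofs are below) =====
def Claim_equal_extend_right_py : Prop := ∀ (big_si : List (List Int)) (big_w : List Int) (b : Int), Dom_extend_right_py big_si big_w b → Spec_extend_right_py big_si big_w b (extend_right_py big_si big_w b)

-- ===== LEMMAS AND PROOFS =====

-- the (sums, acc) accumulator of B's inner scan, as a standalone function on lists
def pvScan (l : List Int) (a : Int) : List Int :=
  match l with
  | [] => []
  | v :: t => (a + v) :: pvScan t (a + v)

lemma pvScan_spec (l : List Int) (a : Int) (init : List Int) :
    l.foldl (fun (st : List Int × Int) v => (st.1 ++ [st.2 + v], st.2 + v)) (init, a)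
      = (init ++ pvScan l a, a + l.sum) := by
  induction l generalizing a init with
  | nil => simp [pvScan]
  | cons v t ih => simp [pvScan, ih, List.append_assoc]; ring

lemma mem_pvScan (l : List Int) (a p : Int) :
    p ∈ pvScan l a ↔ ∃ j : Nat, 0 < j ∧ j ≤ l.length ∧ p = a + (l.take j).sum := by
  induction l generalizing a with
  | nil => simp [pvScan]
  | cons v t ih =>
    simp only [pvScan, List.mem_cons, ih]
    constructor
    · rintro (h | ⟨j, hj0, hjl, hp⟩)
      · exact ⟨1, by omega, by simp, by simp [h]⟩
      · exact ⟨j + 1, by omega, by simp; omega, by simp [hp]; ring⟩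
    · rintro ⟨j, hj0, hjl, hp⟩
      match j, hj0 with
      | 1, _ => left; simpa using hp
      | (j' + 2), _ =>
        right
        refine ⟨j' + 1, by omega, by simpa using hjl, ?_⟩
        simp at hp; rw [hp]; ring

lemma cond_eq (big_w : List Int) (b : Int) (s : List Int) (w : Int) :
    PySem.Set.issubset (PySem.Set.ofList
        ((PySem.List.pyRange 1 b 1).map (fun x =>
          w + (PySem.List.slice s.reverse none (some x)).sum))) big_w
      = (if b - 1 > (s.length : Int) ∧
            ((PySem.List.slice s.reverse none (some (max 0 (min (b - 1) (s.length : Int))))).foldl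
              (fun (st : List Int × Int) v => (st.1 ++ [st.2 + v], st.2 + v)) ([], 0)).1 = []
          then [0]
          else ((PySem.List.slice s.reverse none (some (max 0 (min (b - 1) (s.length : Int))))).foldl
              (fun (st : List Int × Int) v => (st.1 ++ [st.2 + v], st.2 + v)) ([], 0)).1).all
          (fun p => PySem.Set.contains big_w (w + p)) := by
  have hk : (0:Int) ≤ max 0 (min (b-1) (s.length:Int)) := le_max_left _ _
  rw [PySem.List.slice_to _ hk, pvScan_spec]
  rw [Bool.eq_iff_iff]
  simp only [PySem.Set.issubset, PySem.Set.contains, List.all_eq_true, PySem.Set.mem_ofList,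
    List.mem_map, PySem.List.mem_pyRange_one, List.contains_eq_mem, decide_eq_true_eq,
    List.nil_append, forall_exists_index, and_imp]
  set rv := s.reverse with hrvdef
  set K := (max 0 (min (b - 1) (s.length:Int))).toNat with hKdef
  clear_value K
  have hrvlen : rv.length = s.length := s.length_reverse
  constructor
  · intro hA p hp
    by_cases hc : b - 1 > ((s.length:Int)) ∧ pvScan (rv.take K) 0 = []
    · rw [if_pos hc] at hp
      simp only [List.mem_singleton] at hp
      subst hp
      have hN0 : s.length = 0 := by
        rcases hc with ⟨hb, hsc⟩
        have hK : K = s.length := by omega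
        have : (rv.take K) = [] := by
          cases h : rv.take K with
          | nil => rfl
          | cons a t => rw [h] at hsc; simp [pvScan] at hsc
        have hlen : (rv.take K).length = 0 := by rw [this]; rfl
        rw [List.length_take] at hlen
        omega
      have h1b : (1:Int) < b := by omega
      have := hA (w + (PySem.List.slice rv none (some 1)).sum) 1 le_rfl h1b rfl
      have hrv : rv = [] := by
        have := congrArg List.length (rfl : rv = rv)
        exact List.eq_nil_of_length_eq_zero (by omega)
      simpa [hrv, PySem.List.slice] using this
    · rw [if_neg hc] at hp
      rw [mem_pvScan] at hp
      obtain ⟨j, hj0, hjl, hp⟩ := hp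
      have h2 : (rv.take K).length = min K rv.length := List.length_take
      have hjK : j ≤ K := by omega
      have hjN : j ≤ s.length := by omega
      have hjb : (j:Int) < b := by omega
      have := hA (w + (PySem.List.slice rv none (some (j:Int))).sum) (j:Int)
        (by exact_mod_cast hj0) hjb rfl
      rw [PySem.List.slice_to _ (by positivity)] at this
      have htt : (rv.take K).take j = rv.take j := by
        rw [List.take_take]; congr 1; omega
      rw [hp]
      simpa [htt, Int.toNat_natCast] using this
  · intro hB x a h1 hab hx
    subst hx
    rw [PySem.List.slice_to _ (by omega)]
    by_cases hN : s.length = 0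
    · have hrv : rv = [] := List.eq_nil_of_length_eq_zero (by omega)
      have hc : b - 1 > ((s.length:Int)) ∧ pvScan (rv.take K) 0 = [] := by
        constructor
        · omega
        · simp [hrv, pvScan]
      rw [if_pos hc] at hB
      simpa [hrv] using hB 0 (by simp)
    · -- N ≥ 1
      have hb2 : (1:Int) ≤ b - 1 := by omega
      have hKeq : (K:Int) = min (b-1) (s.length:Int) := by omega
      set j0 := min a.toNat s.length with hj0def
      have hj01 : 1 ≤ j0 := by omega
      have hj0K : j0 ≤ K := by omega
      have htake : rv.take a.toNat = rv.take j0 := by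
        by_cases h : a.toNat ≤ s.length
        · simp [hj0def, Nat.min_eq_left h]
        · rw [List.take_of_length_le (by omega), hj0def, Nat.min_eq_right (by omega),
            List.take_of_length_le (by omega)]
      have hmem : (rv.take j0).sum ∈ pvScan (rv.take K) 0 := by
        rw [mem_pvScan]
        refine ⟨j0, hj01, ?_, ?_⟩
        · rw [List.length_take]; omega
        · rw [List.take_take, Nat.min_eq_left hj0K]
          omega
      have hcf : ¬ (b - 1 > ((s.length:Int)) ∧ pvScan (rv.take K) 0 = []) := by
        rintro ⟨-, hsc⟩
        rw [hsc] at hmem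
        simp at hmem
      rw [if_neg hcf] at hB
      rw [htake]
      exact hB _ hmem


-- ===== VERDICT (by name: the statement is the Claim_ definition above) =====
theorem extend_right_py_spec : Claim_equal_extend_right_py := by
  intro big_si big_w b _
  unfold Spec_extend_right_py extend_right_py extend_right_py_alt
  congr 1
  funext bs s
  simp only []
  congr 1
  funext bs' w
  rw [cond_eq]
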